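-- pv_equiv track=rewrite | github.com/codemicro/adventOfCode | 24-lobbyLayout/python/common.py | parse
-- ===== SOURCE A (Python) =====
-- from typing import List, Tuple, Dict
--
-- def parse(instr: str) -> List[str]:
--     # e, se, sw, w, nw, and ne
--
--     tiles = instr.strip().split("\n")
--     o = []
--
--     for tile_line in tiles:
--         tl = []
--         pointer = 0
--         while pointer < len(tile_line):
--             current = tile_line[pointer]
--             if current in ["s", "n"]:
--                 tl.append(tile_line[pointer : pointer + 2])
--                 pointer += 2
--             else:
--                 tl.append(current)
--                 pointer += 1
--         o.append(tl)
--
--     return o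
-- ===== SOURCE B (Python) =====
-- def parse(instr):
--     # Idiomatic rewrite: per line, consume characters through an iterator;
--     # an 's'/'n' pulls its partner directly from the iterator (no index pointer, no slicing).
--     out = []
--     for line in instr.strip().split("\n"):
--         it = iter(line)
--         out.append([c + next(it, '') if c in 'sn' else c for c in it])
--     return out
-- ===== Notes on version B (the rewrite author's own statement) =====
-- stated objective: idiomatic
-- what changed: Replaces the inner while-loop that advances an index pointer and slices tile_line[pointer:pointer+2] with a single consuming-iterator comprehension per line: each character is a token, and an 's'/'n' pulls its second character straight off the iterator with next(it, ''); no index arithmetic or slicing remains.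
import Mathlib
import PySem

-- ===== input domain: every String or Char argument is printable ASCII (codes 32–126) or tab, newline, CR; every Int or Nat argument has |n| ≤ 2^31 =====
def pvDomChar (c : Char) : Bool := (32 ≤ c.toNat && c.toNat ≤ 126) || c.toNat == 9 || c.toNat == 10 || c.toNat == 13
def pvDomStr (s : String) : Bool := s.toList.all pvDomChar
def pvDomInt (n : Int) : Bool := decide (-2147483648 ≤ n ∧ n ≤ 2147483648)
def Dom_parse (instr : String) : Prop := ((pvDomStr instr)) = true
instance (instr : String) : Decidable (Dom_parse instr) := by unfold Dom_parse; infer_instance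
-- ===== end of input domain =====

-- B replaces A's index-pointer-and-slice scan with a direct consuming tokenizer (idiomatic; same cost).

-- ===== PORT A =====
-- A's inner while loop: pointer over the line's characters, slicing two chars after 's'/'n'
def parseLineA (s : List Char) (pointer : Nat) (tl : List String) : List String :=
  if h : pointer < s.length then
    let current := s[pointer]
    if current = 's' ∨ current = 'n' then
      parseLineA s (pointer + 2)
        (tl ++ [String.ofList (PySem.List.slice s (some (pointer : Int)) (some ((pointer : Int) + 2)))])
    else
      parseLineA s (pointer + 1) (tl ++ [String.ofList [current]])
  else tl
termination_by s.length - pointer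

def parse (instr : String) : List (List String) :=
  -- split? is none only for sep = ""; sep here is "\n", so getD [] is exact
  let tiles := (PySem.Str.split? (PySem.Str.strip instr) "\n").getD []
  tiles.foldl (fun o tile_line => o ++ [parseLineA tile_line.toList 0 []]) []

-- ===== PORT B =====
-- B's iterator loop: each char is a token; 's'/'n' consumes the next char from the iterator too
def tokenizeB : List Char → List String
  | [] => []
  | c :: rest =>
    if c = 's' ∨ c = 'n' then
      match rest with
      | [] => [String.ofList [c]]          -- next(it, '') exhausted: token is just c
      | d :: rest' => String.ofList [c, d] :: tokenizeB rest'
    else String.ofList [c] :: tokenizeB rest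

def parse_alt (instr : String) : List (List String) :=
  ((PySem.Str.split? (PySem.Str.strip instr) "\n").getD []).map (fun line => tokenizeB line.toList)

-- ===== PRECONDITION & SPEC =====
def Spec_parse (instr : String) (out : List (List String)) : Prop := out = parse_alt instr
instance (instr : String) (out : List (List String)) : Decidable (Spec_parse instr out) := by unfold Spec_parse; infer_instance

-- ===== CLAIM (what is proved, stated in full; the proofs are below) =====
def Claim_equal_parse : Prop := ∀ (instr : String), Dom_parse instr → Spec_parse instr (parse instr)

-- ===== LEMMAS AND PROOFS =====

theorem tokenizeB_nil : tokenizeB [] = [] := by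
  rw [tokenizeB.eq_def]

theorem tokenizeB_cons_other (c : Char) (rest : List Char) (h : ¬(c = 's' ∨ c = 'n')) :
    tokenizeB (c :: rest) = String.ofList [c] :: tokenizeB rest := by
  rw [tokenizeB.eq_def]; simp [h]

theorem tokenizeB_cons_cons_sn (c d : Char) (rest : List Char) (h : c = 's' ∨ c = 'n') :
    tokenizeB (c :: d :: rest) = String.ofList [c, d] :: tokenizeB rest := by
  rw [tokenizeB.eq_def]; simp [h]

theorem tokenizeB_singleton_sn (c : Char) (h : c = 's' ∨ c = 'n') :
    tokenizeB [c] = [String.ofList [c]] := by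
  rw [tokenizeB.eq_def]; simp [h]

theorem parseLineA_eq_tokenizeB (n : Nat) :
    ∀ (s : List Char) (p : Nat) (tl : List String), s.length - p ≤ n →
      parseLineA s p tl = tl ++ tokenizeB (s.drop p) := by
  induction n with
  | zero =>
    intro s p tl h
    have hp : ¬ p < s.length := by omega
    rw [parseLineA]
    simp [hp, List.drop_eq_nil_of_le (by omega : s.length ≤ p), tokenizeB]
  | succ n ih =>
    intro s p tl h
    by_cases hp : p < s.length
    · have hdrop : s.drop p = s[p] :: s.drop (p + 1) := List.drop_eq_getElem_cons hp
      rw [parseLineA]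
      simp only [hp, dif_pos]
      by_cases hsn : s[p] = 's' ∨ s[p] = 'n'
      · simp only [hsn, if_pos]
        have hslice : PySem.List.slice s (some (p : Int)) (some ((p : Int) + 2)) =
            (s.drop p).take 2 := by
          have := PySem.List.slice_natCast_add (xs := s) (j := p) (n := 2)
          simpa using this
        rw [ih s (p + 2) _ (by omega), hslice]
        by_cases hp1 : p + 1 < s.length
        · have hdrop1 : s.drop (p + 1) = s[p+1] :: s.drop (p + 2) :=
            List.drop_eq_getElem_cons hp1
          have htake : (s.drop p).take 2 = [s[p], s[p+1]] := by rw [hdrop, hdrop1]; rfl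
          rw [htake]
          conv_rhs => rw [hdrop, hdrop1, tokenizeB_cons_cons_sn _ _ _ hsn]
          simp
        · have h1 : s.drop (p + 1) = [] := List.drop_eq_nil_of_le (by omega)
          have h2 : s.drop (p + 2) = [] := List.drop_eq_nil_of_le (by omega)
          have htake : (s.drop p).take 2 = [s[p]] := by rw [hdrop, h1]; rfl
          rw [htake, h2, tokenizeB_nil]
          conv_rhs => rw [hdrop, h1, tokenizeB_singleton_sn _ hsn]
          simp
      · simp only [hsn, if_neg, not_false_iff]
        rw [ih s (p + 1) _ (by omega)]
        conv_rhs => rw [hdrop, tokenizeB_cons_other _ _ hsn]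
        simp
    · rw [parseLineA]
      simp [hp, List.drop_eq_nil_of_le (by omega : s.length ≤ p), tokenizeB]

-- ===== VERDICT (by name: the statement is the Claim_ definition above) =====
theorem parse_spec : Claim_equal_parse := by
  intro instr _
  unfold Spec_parse parse parse_alt
  rw [PySem.List.foldl_append_singleton_eq_map, List.nil_append]
  refine List.map_congr_left ?_
  intro line _
  simpa using parseLineA_eq_tokenizeB line.toList.length line.toList 0 [] (by omega)
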